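-- pv_equiv track=rewrite | github.com/PeerBroxtermann/Censor_Dispenser | censor_dispenser.py | censor_two
-- ===== SOURCE A (Python) =====
-- punctuation = [" ", ".", "," , ";", ":", "\n"]
--
-- def lst_casing(lst):
--     temp_lst = []
--     for item in lst:
--         temp_lst.append(item.title())
--     lst += temp_lst
--     return lst
--
-- def censor_cleanup(email):
--     email_chars = []
--     email_cleaned = ""
--     for i in range(len(email)):
--         email_chars.append(email[i])
--     for i in range(len(email_chars)-1):
--         if email_chars[i] == "*" and email_chars[i+1] not in punctuation:
--             email_chars[i+1] = "*"
--     for i in email_chars: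
--         email_cleaned += i
--     return email_cleaned
--
-- def censor_two(email, term_lst):
--     temp = email
--     cased_lst = lst_casing(term_lst) #lst_casing is a separate function found at the bottom of the code
--     for item in cased_lst:
--         email_censored = temp.replace(item, len(item)*"*")
--         temp = email_censored
--     email_censored = censor_cleanup(temp)
--     return email_censored
-- ===== SOURCE B (Python) =====
-- # B: same sequential .replace censoring (and the same in-place growth of term_lst),
-- # but the cleanup is word-level: split into punctuation-delimited chunks and in
-- # each chunk blank everything from the first '*' onward, instead of per-char
-- # lookahead mutation.
-- punctuation = [" ", ".", ",", ";", ":", "\n"]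
--
-- def censor_two(email, term_lst):
--     term_lst += [item.title() for item in list(term_lst)]  # same mutation as A's lst_casing
--     for item in term_lst:
--         email = email.replace(item, "*" * len(item))
--     pieces = []
--     i = 0
--     n = len(email)
--     while i < n:
--         if email[i] in punctuation:
--             pieces.append(email[i])
--             i += 1
--         else:
--             j = i
--             while j < n and email[j] not in punctuation:
--                 j += 1
--             word = email[i:j]
--             k = word.find("*")
--             pieces.append(word if k < 0 else word[:k] + "*" * (len(word) - k))
--             i = j
--     return "".join(pieces)
-- ===== Notes on version B (the rewrite author's own statement) =====
-- stated objective: alternative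
-- what changed: The cleanup stage (copy the string into a mutable char list, then a lookahead loop that cascades '*' into the next cell, then rejoin) is replaced by a word-level pass: split the censored string into punctuation-delimited chunks and, in each chunk, blank everything from the first '*' onward with word.find; the sequential .replace censoring loop and the in-place growth of term_lst are kept.
import Mathlib
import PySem

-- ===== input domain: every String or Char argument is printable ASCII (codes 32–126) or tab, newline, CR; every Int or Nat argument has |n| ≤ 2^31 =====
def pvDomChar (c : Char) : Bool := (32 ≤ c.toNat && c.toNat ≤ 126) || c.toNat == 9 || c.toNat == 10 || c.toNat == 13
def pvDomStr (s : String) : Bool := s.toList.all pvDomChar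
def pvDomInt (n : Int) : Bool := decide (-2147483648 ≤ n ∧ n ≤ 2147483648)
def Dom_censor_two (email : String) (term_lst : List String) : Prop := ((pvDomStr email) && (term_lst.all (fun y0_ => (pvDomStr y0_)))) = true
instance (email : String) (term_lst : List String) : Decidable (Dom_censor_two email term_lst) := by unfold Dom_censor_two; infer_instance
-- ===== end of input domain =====

-- B replaces A's char-array cleanup (lookahead writes into a mutable list) by a word-level
-- pass: split on punctuation and blank each chunk from its first '*' onward; equivalence is
-- about the RETURN value (both Pythons also grow term_lst in place the same way).

-- Python's punctuation list (length-1 strings, so Char here)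
def pvPunct : List Char := [' ', '.', ',', ';', ':', '\n']

-- hand port of str.title(), exact on ASCII: a letter after a non-letter is uppercased,
-- a letter after a letter lowercased (prev = previous char was a letter)
def pvTitleChars : Bool → List Char → List Char
  | _, [] => []
  | prev, c :: cs =>
    if c.isAlpha then (if prev then c.toLower else c.toUpper) :: pvTitleChars true cs
    else c :: pvTitleChars false cs

def pvTitle (s : String) : String := String.ofList (pvTitleChars false s.toList)

-- ===== PORT A =====
-- one mutation step of A's cleanup loop body (email_chars[i] == "*" and lookahead write)
def pvStep (cs : List Char) (i : Nat) : List Char :=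
  if cs.getD i ' ' = '*' ∧ ¬ pvPunct.contains (cs.getD (i + 1) ' ') then cs.set (i + 1) '*' else cs

def pvCensorCleanup (email : String) : String :=
  -- first loop: email_chars.append(email[i]) for i in range(len(email)); indices are in range
  let chars := (List.range email.toList.length).foldl (fun a i => a ++ [email.toList.getD i ' ']) []
  -- second loop: for i in range(len(email_chars)-1): lookahead mutation
  let chars := (List.range (chars.length - 1)).foldl pvStep chars
  -- third loop: email_cleaned += i
  chars.foldl (fun s c => s.push c) ""

def censor_two (email : String) (term_lst : List String) : String :=
  let cased_lst := term_lst ++ term_lst.map pvTitle   -- lst_casing: lst += [item.title() …]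
  let temp := cased_lst.foldl
    (fun t item => PySem.Str.replace t item (String.ofList (List.replicate item.toList.length '*'))) email
  pvCensorCleanup temp

-- ===== PORT B =====
-- word[:k] + '*' * (len(word)-k) with k = word.find('*') (word if k < 0)
def pvTransform (w : List Char) : List Char :=
  let pre := w.takeWhile (fun d => d ≠ '*')
  if pre.length = w.length then w   -- k < 0: no '*'
  else pre ++ List.replicate (w.length - pre.length) '*'

-- Source B's outer while loop: punctuation chars pass through; a maximal punctuation-free
-- chunk (email[i:j], scanned by the inner while) is transformed as a whole
def pvWords : List Char → List Char
  | [] => []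
  | c :: cs =>
    if pvPunct.contains c then c :: pvWords cs
    else pvTransform (c :: cs.takeWhile (fun d => ¬ pvPunct.contains d))
         ++ pvWords (cs.dropWhile (fun d => ¬ pvPunct.contains d))
termination_by l => l.length
decreasing_by
  · simp
  · have := List.length_dropWhile_le (fun d => ¬ pvPunct.contains d) cs
    simp only [List.length_cons]; omega

def censor_two_alt (email : String) (term_lst : List String) : String :=
  let cased_lst := term_lst ++ term_lst.map pvTitle   -- term_lst += [item.title() for item in list(term_lst)]
  let censored := cased_lst.foldl
    (fun t item => PySem.Str.replace t item (String.ofList (List.replicate item.toList.length '*'))) email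
  String.ofList (pvWords censored.toList)

-- ===== PRECONDITION & SPEC =====
def Spec_censor_two (email : String) (term_lst : List String) (out : String) : Prop := out = censor_two_alt email term_lst
instance (email : String) (term_lst : List String) (out : String) : Decidable (Spec_censor_two email term_lst out) := by unfold Spec_censor_two; infer_instance

-- ===== CLAIM (what is proved, stated in full; the proofs are below) =====
def Claim_equal_censor_two : Prop := ∀ (email : String) (term_lst : List String), Dom_censor_two email term_lst → Spec_censor_two email term_lst (censor_two email term_lst)

-- ===== LEMMAS AND PROOFS =====

-- proof-side device: the star-propagation as a left-to-right flag scan; A's mutation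
-- fold and B's word pass are each shown equal to it
def pvScan : Bool → List Char → List Char
  | _, [] => []
  | f, c :: cs =>
    if c = '*' then '*' :: pvScan true cs
    else if f ∧ ¬ pvPunct.contains c then '*' :: pvScan f cs
    else c :: pvScan false cs

-- A's first loop rebuilds the char list of the string
theorem pvBuild_take (l : List Char) : ∀ n, n ≤ l.length →
    (List.range n).foldl (fun a i => a ++ [l.getD i ' ']) [] = l.take n := by
  intro n
  induction n with
  | zero => intro _; simp
  | succ n ih =>
    intro h
    have hn : n < l.length := by omega
    rw [List.range_succ, List.foldl_append, ih (by omega)]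
    simp only [List.foldl_cons, List.foldl_nil]
    rw [List.getD_eq_getElem l ' ' hn, List.take_succ_eq_append_getElem hn]

theorem pvBuild (l : List Char) :
    (List.range l.length).foldl (fun a i => a ++ [l.getD i ' ']) [] = l := by
  simpa using pvBuild_take l l.length le_rfl

-- A's third loop builds the string of the char list
theorem pvPush (l : List Char) : ∀ s : String,
    l.foldl (fun s c => s.push c) s = String.ofList (s.toList ++ l) := by
  induction l with
  | nil => intro s; simp
  | cons c cs ih =>
    intro s
    rw [List.foldl_cons, ih]
    simp

-- head step of the scan from a cleared flag
theorem pvScan_false_cons (c : Char) (cs : List Char) :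
    pvScan false (c :: cs) = c :: pvScan (c = '*' : Bool) cs := by
  by_cases h : c = '*' <;> simp [pvScan, h]

-- one step of the scan, for any flag
theorem pvScan_cons (f : Bool) (d : Char) (ds : List Char) :
    pvScan f (d :: ds) =
      (if f ∧ ¬ pvPunct.contains d then '*' else d) ::
        pvScan (decide ((if f ∧ ¬ pvPunct.contains d then '*' else d) = '*')) ds := by
  by_cases hd : d = '*' <;> by_cases hf : (f : Prop) <;>
    by_cases hp : pvPunct.contains d = true <;>
    simp_all [pvScan, pvPunct]

-- main invariant for A: the mutation fold over the remaining indices equals the flag scan,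
-- where 'pre' is the already-final prefix and the flag is "last final char is '*'"
theorem pvMut (suf : List Char) : ∀ pre : List Char, 0 < pre.length →
    (List.range' (pre.length - 1) suf.length).foldl pvStep (pre ++ suf)
      = pre ++ pvScan (pre.getD (pre.length - 1) ' ' = '*' : Bool) suf := by
  induction suf with
  | nil => intro pre _; simp [pvScan]
  | cons d ds ih =>
    intro pre hpre
    have hlen : pre.length - 1 + 1 = pre.length := by omega
    have h1 : (pre ++ d :: ds).getD (pre.length - 1) ' ' = pre.getD (pre.length - 1) ' ' := by
      simp [List.getD_eq_getElem?_getD, List.getElem?_append_left (by omega : pre.length - 1 < pre.length)]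
    have h2 : (pre ++ d :: ds).getD (pre.length - 1 + 1) ' ' = d := by
      rw [hlen]
      simp [List.getD_eq_getElem?_getD]
    set x : Char := if pre.getD (pre.length - 1) ' ' = '*' ∧ ¬ pvPunct.contains d then '*' else d with hx
    have hstep : pvStep (pre ++ d :: ds) (pre.length - 1) = (pre ++ [x]) ++ ds := by
      rw [pvStep, h1, h2, hx]
      by_cases hc : pre.getD (pre.length - 1) ' ' = '*' ∧ ¬ pvPunct.contains d
      · rw [if_pos hc, if_pos hc, hlen]
        simp
      · rw [if_neg hc, if_neg hc]
        simp
    have hx' : (pre ++ [x]).getD ((pre ++ [x]).length - 1) ' ' = x := by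
      simp [List.getD_eq_getElem?_getD]
    have ih' := ih (pre ++ [x]) (by simp)
    rw [List.length_cons, List.range'_succ, List.foldl_cons, hstep]
    rw [show pre.length - 1 + 1 = (pre ++ [x]).length - 1 by simp [hlen]]
    rw [ih', hx']
    have hscan : pvScan (pre.getD (pre.length - 1) ' ' = '*' : Bool) (d :: ds)
        = x :: pvScan (x = '*' : Bool) ds := by
      rw [pvScan_cons]
      simp [hx]
    rw [hscan]
    simp

-- A's cleanup equals the flag scan
theorem pvCleanup_eq_scan (s : String) :
    pvCensorCleanup s = String.ofList (pvScan false s.toList) := by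
  unfold pvCensorCleanup
  rw [pvBuild, pvPush]
  cases hl : s.toList with
  | nil => simp [pvScan]
  | cons c rest =>
    have := pvMut rest [c] (by simp)
    simp only [List.length_cons, Nat.add_sub_cancel, List.range_eq_range']
    simp only [List.length_singleton, Nat.sub_self, List.singleton_append] at this
    rw [this, pvScan_false_cons]
    simp

-- the scan passes a punctuation char through and clears the flag, whatever the flag was
theorem pvScan_punct (f : Bool) (c : Char) (cs : List Char) (hc : pvPunct.contains c = true) :
    pvScan f (c :: cs) = c :: pvScan false cs := by
  have hne : c ≠ '*' := by
    intro h; subst h; simp [pvPunct] at hc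
  have hm : c ∈ pvPunct := by simpa using hc
  cases f <;> simp [pvScan, hne, hm]

-- inside a punctuation-free chunk with the flag set, everything becomes '*'
theorem pvScan_true_word (rest : List Char) :
    ∀ w : List Char, w.all (fun d => ¬ pvPunct.contains d) = true →
    pvScan true (w ++ rest) = List.replicate w.length '*' ++ pvScan true rest := by
  intro w
  induction w with
  | nil => simp
  | cons c cs ih =>
    intro h
    simp only [List.all_cons, Bool.and_eq_true] at h
    by_cases hc : c = '*'
    · simp [pvScan, hc, ih h.2, List.replicate_succ]
    · have hm : c ∉ pvPunct := by simpa using h.1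
      simp [pvScan, hc, hm, ih h.2, List.replicate_succ]

-- inside a punctuation-free chunk with the flag clear, the scan is B's word transform,
-- and the flag afterwards is "the chunk contained a '*'"
theorem pvScan_false_word (rest : List Char) :
    ∀ w : List Char, w.all (fun d => ¬ pvPunct.contains d) = true →
    pvScan false (w ++ rest) = pvTransform w ++ pvScan (w.contains '*') rest := by
  intro w
  induction w with
  | nil => simp [pvTransform]
  | cons c cs ih =>
    intro h
    simp only [List.all_cons, Bool.and_eq_true] at h
    by_cases hc : c = '*'
    · subst hc
      rw [List.cons_append]
      have : pvScan false ('*' :: (cs ++ rest)) = '*' :: pvScan true (cs ++ rest) := by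
        simp [pvScan]
      rw [this, pvScan_true_word rest cs h.2]
      simp [pvTransform, List.replicate_succ]
    · have hcp : pvPunct.contains c = false := by simpa using h.1
      have hstep : pvScan false (c :: (cs ++ rest)) = c :: pvScan false (cs ++ rest) := by
        simp [pvScan, hc]
      rw [List.cons_append, hstep, ih h.2]
      have htrans : pvTransform (c :: cs) = c :: pvTransform cs := by
        unfold pvTransform
        rw [List.takeWhile_cons_of_pos (by simpa using hc)]
        simp only [List.length_cons, List.cons_append, Nat.add_sub_add_right]
        split_ifs with h1 h2
        · rfl
        · exact absurd (by omega) h2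
        · exact absurd (by omega) h1
        · rfl
      have hcont : (c :: cs).contains '*' = cs.contains '*' := by
        have hbe : ('*' == c) = false := beq_eq_false_iff_ne.mpr (Ne.symm hc)
        rw [List.contains_cons, hbe, Bool.false_or]
      rw [htrans, hcont]
      simp

-- B's word pass equals the flag scan
theorem pvWords_eq_scan : ∀ l : List Char, pvWords l = pvScan false l := by
  intro l
  induction l using pvWords.induct with
  | case1 => simp [pvWords, pvScan]
  | case2 c cs hc ih =>
    rw [pvWords, if_pos hc, ih, pvScan_punct false c cs hc]
  | case3 c cs hc ih =>
    rw [pvWords, if_neg hc]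
    have hsplit : c :: cs
        = (c :: cs.takeWhile (fun d => ¬ pvPunct.contains d))
          ++ cs.dropWhile (fun d => ¬ pvPunct.contains d) := by
      simp [List.takeWhile_append_dropWhile]
    have hall : (c :: cs.takeWhile (fun d => ¬ pvPunct.contains d)).all
        (fun d => ¬ pvPunct.contains d) = true := by
      simp only [List.all_cons, Bool.and_eq_true]
      constructor
      · simpa using hc
      · exact List.all_takeWhile ..
    conv_rhs => rw [hsplit]
    rw [pvScan_false_word _ _ hall]
    congr 1
    rw [ih]
    -- the flag at the chunk boundary is irrelevant: the rest is empty or starts with punctuation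
    cases hr : cs.dropWhile (fun d => ¬ pvPunct.contains d) with
    | nil => simp [pvScan]
    | cons d ds =>
      have hnil : cs.dropWhile (fun d => ¬ pvPunct.contains d) ≠ [] := by
        rw [hr]; exact List.cons_ne_nil _ _
      have hd : pvPunct.contains d = true := by
        have := List.head_dropWhile_not (p := fun d => ¬ pvPunct.contains d) (l := cs) hnil
        simp only [hr, List.head_cons] at this
        simpa using this
      exact (pvScan_punct false d ds hd).trans (pvScan_punct _ d ds hd).symm

-- ===== VERDICT (by name: the statement is the Claim_ definition above) =====
theorem censor_two_spec : Claim_equal_censor_two := by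
  intro email term_lst _
  unfold Spec_censor_two censor_two censor_two_alt
  rw [pvCleanup_eq_scan, ← pvWords_eq_scan]
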